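-- pv_equiv track=rewrite | github.com/hoodr/Algorithms_final_project | image.py | countNaive
-- ===== SOURCE A (Python) =====
-- def countNaive(data):
--     """"
--     Iterate through all pixels, get counts for 1s and 0s
--     """
--     width, height = len(data[0]), len(data)
--     ones = 0
--     zeros = 0
--     for w in range(width):
--         for h in range(height):
--             if data[h][w] == 1:
--                 ones += 1
--             else:
--                 zeros += 1
--     return ones, zeros
-- ===== SOURCE B (Python) =====
-- def countNaive(data):
--     """Divide-and-conquer: split the row list in halves recursively, count each half, combine."""
--     width = len(data[0])
--     def count(rows):
--         if not rows:
--             return 0, 0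
--         if len(rows) == 1:
--             ones = sum(1 for x in rows[0][:width] if x == 1)
--             return ones, width - ones
--         mid = len(rows) // 2
--         o1, z1 = count(rows[:mid])
--         o2, z2 = count(rows[mid:])
--         return o1 + o2, z1 + z2
--     return count(data)
-- ===== Notes on version B (the rewrite author's own statement) =====
-- stated objective: alternative
-- what changed: Replaces column-major nested index loops with a divide-and-conquer recursion that splits the row list in halves and combines (ones, zeros) pairs, deriving per-row zeros as width - ones.
import Mathlib
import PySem

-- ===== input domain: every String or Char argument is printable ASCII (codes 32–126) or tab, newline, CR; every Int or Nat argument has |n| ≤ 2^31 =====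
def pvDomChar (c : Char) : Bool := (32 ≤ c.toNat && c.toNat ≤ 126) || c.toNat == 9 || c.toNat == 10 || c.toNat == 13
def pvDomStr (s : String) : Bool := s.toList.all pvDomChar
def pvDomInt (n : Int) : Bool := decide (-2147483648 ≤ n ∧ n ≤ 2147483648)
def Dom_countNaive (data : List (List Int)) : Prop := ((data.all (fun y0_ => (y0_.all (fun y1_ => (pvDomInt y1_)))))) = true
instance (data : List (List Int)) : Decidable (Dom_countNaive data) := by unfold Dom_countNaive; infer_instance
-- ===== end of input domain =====

-- B replaces A's column-major nested index loops by a divide-and-conquer recursion that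
-- splits the row list in halves and combines (ones, zeros) pairs: alternative decomposition, same cost.

-- ===== PORT A =====
def countNaive (data : List (List Int)) : Int × Int :=
  let width : Int := (PySem.List.pyGetD data 0 []).length
  let height : Int := data.length
  (PySem.List.pyRange 0 width 1).foldl (fun acc w =>
    (PySem.List.pyRange 0 height 1).foldl (fun acc h =>
      if PySem.List.pyGetD (PySem.List.pyGetD data h []) w 0 == 1 then (acc.1 + 1, acc.2)
      else (acc.1, acc.2 + 1)) acc) ((0 : Int), (0 : Int))

-- ===== PORT B =====
-- inner recursive 'count(rows)' of Source B, made structurally recursive on a fuel that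
-- starts at len(rows) (a pure totality device; it never runs out on the actual calls);
-- rows[:mid] / rows[mid:] with 0 <= mid <= len are exactly take/drop, and
-- len(rows)//2 on a nonnegative length is exactly Nat division.
def pvCountGo (width : Int) (fuel : Nat) (rows : List (List Int)) : Int × Int :=
  match fuel with
  | 0 => (0, 0)
  | f + 1 =>
    if rows.length = 0 then (0, 0)   -- 'if not rows'
    else if rows.length = 1 then
      -- ones = sum(1 for x in rows[0][:width] if x == 1)
      let ones : Int := (PySem.List.slice (PySem.List.pyGetD rows 0 []) none (some width)).foldl
          (fun a x => if x == 1 then a + 1 else a) 0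
      (ones, width - ones)
    else
      let mid : Nat := rows.length / 2
      let l := pvCountGo width f (rows.take mid)
      let r := pvCountGo width f (rows.drop mid)
      (l.1 + r.1, l.2 + r.2)

def countNaive_alt (data : List (List Int)) : Int × Int :=
  let width : Int := (PySem.List.pyGetD data 0 []).length
  pvCountGo width data.length data

-- ===== PRECONDITION & SPEC =====
-- Pre_ excludes exactly the inputs where A raises IndexError: empty data (len(data[0])),
-- and jagged data where some row is shorter than the first row (data[h][w] out of range).
def Pre_countNaive (data : List (List Int)) : Prop :=
  data ≠ [] ∧ ∀ row ∈ data, (data.headI).length ≤ row.length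
instance (data : List (List Int)) : Decidable (Pre_countNaive data) := by unfold Pre_countNaive; infer_instance
def pvWitness_countNaive : List (List Int) := [[1, 0, 1], [0, 1, 1]]

def Spec_countNaive (data : List (List Int)) (out : Int × Int) : Prop := out = countNaive_alt data
instance (data : List (List Int)) (out : Int × Int) : Decidable (Spec_countNaive data out) := by unfold Spec_countNaive; infer_instance

-- ===== CLAIM (what is proved, stated in full; the proofs are below) =====
def Claim_equal_countNaive : Prop := ∀ (data : List (List Int)), Dom_countNaive data → Pre_countNaive data → Spec_countNaive data (countNaive data)

-- ===== LEMMAS AND PROOFS =====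

-- number of rows whose w-th pixel is 1
def pvCnt (data : List (List Int)) (w : Int) : Nat :=
  data.countP (fun row => PySem.List.pyGetD row w 0 == 1)

-- per-row sum of ones in the first n pixels
def pvS (n : Nat) (rows : List (List Int)) : Int :=
  (rows.map (fun row => ((row.take n).count 1 : Int))).sum

lemma pv_inner (data : List (List Int)) (w : Int) (acc : Int × Int) :
    data.foldl (fun acc row =>
        if PySem.List.pyGetD row w 0 == 1 then (acc.1 + 1, acc.2) else (acc.1, acc.2 + 1)) acc
      = (acc.1 + (pvCnt data w : Int), acc.2 + ((data.length : Int) - (pvCnt data w : Int))) := by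
  induction data generalizing acc with
  | nil => simp [pvCnt]
  | cons row rest ih =>
    simp only [List.foldl_cons, pvCnt, List.countP_cons]
    by_cases h : PySem.List.pyGetD row w 0 == 1
    · rw [if_pos h, ih]
      simp only [pvCnt, Prod.mk.injEq, h, if_pos, List.length_cons]
      constructor <;> (push_cast; omega)
    · rw [if_neg h, ih]
      simp only [pvCnt, Prod.mk.injEq, h, if_neg, Bool.false_eq_true, not_false_iff,
        List.length_cons]
      constructor <;> (push_cast; omega)

lemma pv_outer (data : List (List Int)) (n : Nat) (acc : Int × Int) :
    (List.map (fun (k : Nat) => (k : Int)) (List.range n)).foldl (fun acc w =>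
        data.foldl (fun acc row =>
          if PySem.List.pyGetD row w 0 == 1 then (acc.1 + 1, acc.2) else (acc.1, acc.2 + 1)) acc) acc
      = (acc.1 + (List.map (fun (w : Nat) => (pvCnt data (w : Int) : Int)) (List.range n)).sum,
         acc.2 + n * data.length - (List.map (fun (w : Nat) => (pvCnt data (w : Int) : Int)) (List.range n)).sum) := by
  induction n generalizing acc with
  | zero => simp
  | succ m ih =>
    rw [List.range_succ, List.map_append, List.foldl_append, ih, List.map_append]
    simp only [List.map_cons, List.map_nil, List.foldl_cons, List.foldl_nil, List.sum_append,
      List.sum_cons, List.sum_nil, pv_inner, Prod.mk.injEq]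
    constructor <;> (push_cast; ring)

lemma pv_row (row : List Int) (n : Nat) (h : n ≤ row.length) :
    (List.map (fun (w : Nat) => if PySem.List.pyGetD row (w : Int) 0 == 1 then (1 : Int) else 0) (List.range n)).sum
      = ((row.take n).count 1 : Int) := by
  induction n with
  | zero => simp
  | succ m ih =>
    have hm : m < row.length := h
    rw [List.range_succ, List.map_append, List.sum_append]
    rw [ih (le_of_lt hm), List.take_add_one]
    have hg : row[m]? = some row[m] := List.getElem?_eq_getElem hm
    rw [hg]
    simp only [List.map_cons, List.map_nil, List.sum_cons, List.sum_nil, Option.toList_some,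
      List.count_append, List.count_cons, List.count_nil]
    rw [PySem.List.pyGetD_natCast, List.getD_eq_getElem?_getD, hg]
    by_cases h1 : row[m] = 1 <;> simp [h1]

lemma pv_swap (data : List (List Int)) (n : Nat) (hlen : ∀ row ∈ data, n ≤ row.length) :
    (List.map (fun (w : Nat) => (pvCnt data (w : Int) : Int)) (List.range n)).sum = pvS n data := by
  induction data with
  | nil => simp [pvCnt, pvS]
  | cons row rest ih =>
    have h1 : n ≤ row.length := hlen row (List.mem_cons_self ..)
    have h2 : ∀ r ∈ rest, n ≤ r.length := fun r hr => hlen r (List.mem_cons_of_mem _ hr)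
    have hmap : (List.map (fun (w : Nat) => (pvCnt (row :: rest) (w : Int) : Int)) (List.range n))
        = (List.map (fun (w : Nat) =>
            (if PySem.List.pyGetD row (w : Int) 0 == 1 then (1 : Int) else 0)
              + (pvCnt rest (w : Int) : Int)) (List.range n)) := by
      apply List.map_congr_left
      intro w _
      simp only [pvCnt, List.countP_cons]
      by_cases h : PySem.List.pyGetD row (w : Int) 0 == 1
      · rw [if_pos h, if_pos h]; push_cast; omega
      · rw [if_neg h, if_neg h]; push_cast; omega
    rw [hmap, PySem.List.sum_map_add_int, pv_row row n h1, ih h2]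
    simp [pvS]

-- the 0/1 foldl in B's leaf counts the 1s
lemma pv_leaf (l : List Int) (a : Int) :
    l.foldl (fun a x => if x == 1 then a + 1 else a) a = a + (l.count 1 : Int) := by
  induction l generalizing a with
  | nil => simp
  | cons x xs ih =>
    simp only [List.foldl_cons, List.count_cons, ih]
    by_cases h : x = 1
    · simp [h]; ring
    · simp [h]

-- B's divide-and-conquer computes (Σ ones, n·len − Σ ones) whenever the fuel suffices
lemma pv_count_eq (n : Nat) (k : Nat) (rows : List (List Int)) (hk : rows.length ≤ k) :
    pvCountGo (n : Int) k rows = (pvS n rows, (n : Int) * rows.length - pvS n rows) := by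
  induction k generalizing rows with
  | zero =>
    have : rows = [] := List.eq_nil_of_length_eq_zero (by omega)
    subst this
    simp [pvCountGo, pvS]
  | succ m ih =>
    match rows with
    | [] => simp [pvCountGo, pvS]
    | [row] =>
      rw [pvCountGo]
      simp only [List.length_cons, List.length_nil]
      rw [if_neg (by omega), if_pos trivial]
      rw [PySem.List.pyGetD_zero_cons, PySem.List.slice_to_natCast, pv_leaf]
      simp [pvS]
    | row1 :: row2 :: rest =>
      rw [pvCountGo]
      set rows' := row1 :: row2 :: rest with hrows
      have h2 : 2 ≤ rows'.length := by simp [hrows]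
      rw [if_neg (by omega), if_neg (by omega)]
      have hmidlt : rows'.length / 2 < rows'.length := by omega
      have htake : (rows'.take (rows'.length / 2)).length = rows'.length / 2 := by
        simp; omega
      have hdrop : (rows'.drop (rows'.length / 2)).length = rows'.length - rows'.length / 2 := by
        simp
      have hkrows : rows'.length ≤ m + 1 := hk
      have ihl := ih (rows'.take (rows'.length / 2)) (by rw [htake]; omega)
      have ihr := ih (rows'.drop (rows'.length / 2)) (by rw [hdrop]; omega)
      simp only [ihl, ihr]
      have hsplit : pvS n (rows'.take (rows'.length / 2)) + pvS n (rows'.drop (rows'.length / 2)) = pvS n rows' := by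
        have := List.take_append_drop (rows'.length / 2) rows'
        conv_rhs => rw [← this]
        simp [pvS]
      rw [htake, hdrop]
      have hcast : ((rows'.length / 2 : Nat) : Int) + ((rows'.length - rows'.length / 2 : Nat) : Int) = (rows'.length : Int) := by
        push_cast [Nat.cast_sub (le_of_lt hmidlt)]
        ring
      simp only [Prod.mk.injEq]
      constructor
      · exact hsplit
      · rw [← hsplit]
        linear_combination (n : Int) * hcast

-- ===== VERDICT (by name: the statement is the Claim_ definition above) =====
theorem countNaive_spec : Claim_equal_countNaive := by
  intro data _ hpre
  obtain ⟨hne, hlen⟩ := hpre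
  obtain ⟨r0, rest, rfl⟩ := List.exists_cons_of_ne_nil hne
  unfold Spec_countNaive countNaive countNaive_alt
  simp only [PySem.List.pyGetD_zero_cons]
  rw [PySem.List.pyRange_zero_natCast r0.length]
  have hin : ∀ w : Int, ∀ acc : Int × Int,
      (PySem.List.pyRange 0 (((r0 :: rest).length : Nat) : Int) 1).foldl (fun acc h =>
        if PySem.List.pyGetD (PySem.List.pyGetD (r0 :: rest) h []) w 0 == 1 then (acc.1 + 1, acc.2)
        else (acc.1, acc.2 + 1)) acc
      = (r0 :: rest).foldl (fun acc row =>
        if PySem.List.pyGetD row w 0 == 1 then (acc.1 + 1, acc.2) else (acc.1, acc.2 + 1)) acc := by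
    intro w acc
    exact PySem.List.foldl_pyRange_zero_pyGetD (r0 :: rest) []
      (fun acc row => if PySem.List.pyGetD row w 0 == 1 then (acc.1 + 1, acc.2) else (acc.1, acc.2 + 1)) acc
  simp only [hin]
  rw [pv_outer (r0 :: rest) r0.length ((0 : Int), (0 : Int))]
  rw [pv_swap (r0 :: rest) r0.length hlen, pv_count_eq r0.length (r0 :: rest).length (r0 :: rest) le_rfl]
  simp only [Prod.mk.injEq]
  constructor
  · ring
  · ring
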